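-- pv_equiv track=rewrite | github.com/jordag18/RecipeKeepClassificationAlgorithm | RecipeDatabase.py | classify_recipe
-- ===== SOURCE A (Python) =====
-- def classify_recipe(ingredients):
--     lactose_free = {'milk', 'cheese', 'yogurt', 'cream', 'butter', 'curd', 'sour cream', 'buttermilk', 'margarine'}
--     gluten_free = {'yeast', 'flour', 'wheat', 'bread', 'bread crumbs', 'beer', 'rye', 'barley', 'pasta', 'dough',
--                    'macaroni', 'cake'}
--     vegetarian = {'beef', 'chicken', 'eggs', 'egg', 'hamburger', 'pepperoni',
--                   'sausage', 'bologna', 'bacon', 'pork', 'lamb', 'fish', 'shrimp', 'salmon', 'tuna', 'cod', 'anchovy', 'steak', 'milk', 'chocolate'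
--                   , 'condensed milk'}
--     vegan = {'gelatin', 'honey', 'whey', 'ghee', 'lard', 'collagen', 'mayo', 'mayonnaise', 'cake mix', 'cool whip'}
--
--     contains_non_vegan = any(
--         any(ingredient in diet_ingredient for diet_ingredient in vegan.union(vegetarian.union(lactose_free))) for
--         ingredient in ingredients)
--
--     contains_non_vegetarian = any(any(ingredient in diet_ingredient for diet_ingredient in vegetarian) for
--                                   ingredient in ingredients)
--
--     contains_lactose = any(any(ingredient in diet_ingredient for diet_ingredient in lactose_free) for
--                            ingredient in ingredients)
--
--     contains_gluten = any(any(ingredient in diet_ingredient for diet_ingredient in gluten_free) for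
--                           ingredient in ingredients)
--
--     diet = set()
--     if not contains_gluten:
--         diet.add('Gluten-Free')
--     if not contains_non_vegetarian:
--         diet.add('Vegetarian')
--     if not contains_lactose:
--         diet.add('Lactose-Free')
--     if not contains_non_vegan:
--         diet.add('Vegan')
--     if len(diet) == 0:
--         diet.add('No Restrictions')
--     return diet
-- ===== SOURCE B (Python) =====
-- _VEGAN = ['gelatin', 'honey', 'whey', 'ghee', 'lard', 'collagen', 'mayo', 'mayonnaise', 'cake mix', 'cool whip']
-- _VEGETARIAN = ['beef', 'chicken', 'eggs', 'egg', 'hamburger', 'pepperoni', 'sausage', 'bologna', 'bacon', 'pork',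
--                'lamb', 'fish', 'shrimp', 'salmon', 'tuna', 'cod', 'anchovy', 'steak', 'milk', 'chocolate',
--                'condensed milk']
-- _LACTOSE = ['milk', 'cheese', 'yogurt', 'cream', 'butter', 'curd', 'sour cream', 'buttermilk', 'margarine']
-- _GLUTEN = ['yeast', 'flour', 'wheat', 'bread', 'bread crumbs', 'beer', 'rye', 'barley', 'pasta', 'dough',
--            'macaroni', 'cake']
--
-- # one tagged word table: each word maps to a bitmask of the restriction classes it
-- # violates (bit0 non-vegan, bit1 non-vegetarian, bit2 lactose, bit3 gluten)
-- WORD_MASK = {}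
-- for _words, _bits in ((_VEGAN, 1), (_VEGETARIAN, 3), (_LACTOSE, 5), (_GLUTEN, 8)):
--     for _word in _words:
--         WORD_MASK[_word] = WORD_MASK.get(_word, 0) | _bits
--
--
-- def classify_recipe(ingredients):
--     mask = 0
--     for ingredient in ingredients:
--         for word, bits in WORD_MASK.items():
--             if ingredient in word:
--                 mask |= bits
--
--     diet = set()
--     for bit, label in ((3, 'Gluten-Free'), (1, 'Vegetarian'), (2, 'Lactose-Free'), (0, 'Vegan')):
--         if not (mask >> bit) & 1:
--             diet.add(label)
--     if not diet:
--         diet.add('No Restrictions')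
--     return diet
-- ===== Notes on version B (the rewrite author's own statement) =====
-- stated objective: alternative
-- what changed: B replaces A's four separate set-scans per ingredient with a single tagged word table (word -> bitmask of violated restriction classes, the non-vegan bit folded into the other classes' masks) built once; one nested loop ORs matching masks into a single integer, and the diet labels are read off the bits table-driven.
import Mathlib
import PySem

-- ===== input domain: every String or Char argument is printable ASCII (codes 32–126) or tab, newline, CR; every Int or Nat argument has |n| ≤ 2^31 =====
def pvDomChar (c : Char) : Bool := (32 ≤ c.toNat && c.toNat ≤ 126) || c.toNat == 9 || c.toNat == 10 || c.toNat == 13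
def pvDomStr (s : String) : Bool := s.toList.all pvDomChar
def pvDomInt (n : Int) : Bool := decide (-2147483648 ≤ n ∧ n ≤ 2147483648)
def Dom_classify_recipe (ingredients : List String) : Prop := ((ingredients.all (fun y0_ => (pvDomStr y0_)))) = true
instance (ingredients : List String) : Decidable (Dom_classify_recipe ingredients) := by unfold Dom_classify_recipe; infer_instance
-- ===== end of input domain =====

-- B replaces A's four separate set-scans with one tagged word table (word -> bitmask of
-- violated restriction classes) folded into a single integer mask (objective: alternative).

-- ===== PORT A =====
-- the four set literals (distinct elements; iteration order irrelevant to any())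
def pvLactoseFree : List String := ["milk", "cheese", "yogurt", "cream", "butter", "curd", "sour cream", "buttermilk", "margarine"]
def pvGlutenFree : List String := ["yeast", "flour", "wheat", "bread", "bread crumbs", "beer", "rye", "barley", "pasta", "dough", "macaroni", "cake"]
def pvVegetarian : List String := ["beef", "chicken", "eggs", "egg", "hamburger", "pepperoni", "sausage", "bologna", "bacon", "pork", "lamb", "fish", "shrimp", "salmon", "tuna", "cod", "anchovy", "steak", "milk", "chocolate", "condensed milk"]
def pvVegan : List String := ["gelatin", "honey", "whey", "ghee", "lard", "collagen", "mayo", "mayonnaise", "cake mix", "cool whip"]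

def classify_recipe (ingredients : List String) : List String :=
  -- vegan.union(vegetarian.union(lactose_free)) as a PySem.Set
  let nonVeganSet : List String := PySem.Set.ofList (pvVegan ++ (pvVegetarian ++ pvLactoseFree))
  let contains_non_vegan := ingredients.any (fun ing => nonVeganSet.any (fun w => PySem.Str.isIn ing w))
  let contains_non_vegetarian := ingredients.any (fun ing => pvVegetarian.any (fun w => PySem.Str.isIn ing w))
  let contains_lactose := ingredients.any (fun ing => pvLactoseFree.any (fun w => PySem.Str.isIn ing w))
  let contains_gluten := ingredients.any (fun ing => pvGlutenFree.any (fun w => PySem.Str.isIn ing w))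
  let diet : PySem.Set String := []
  let diet := if !contains_gluten then PySem.Set.add diet "Gluten-Free" else diet
  let diet := if !contains_non_vegetarian then PySem.Set.add diet "Vegetarian" else diet
  let diet := if !contains_lactose then PySem.Set.add diet "Lactose-Free" else diet
  let diet := if !contains_non_vegan then PySem.Set.add diet "Vegan" else diet
  if diet.length == 0 then PySem.Set.add diet "No Restrictions" else diet

-- ===== PORT B =====
def pvBVegan : List String := ["gelatin", "honey", "whey", "ghee", "lard", "collagen", "mayo", "mayonnaise", "cake mix", "cool whip"]
def pvBVegetarian : List String := ["beef", "chicken", "eggs", "egg", "hamburger", "pepperoni", "sausage", "bologna", "bacon", "pork", "lamb", "fish", "shrimp", "salmon", "tuna", "cod", "anchovy", "steak", "milk", "chocolate", "condensed milk"]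
def pvBLactose : List String := ["milk", "cheese", "yogurt", "cream", "butter", "curd", "sour cream", "buttermilk", "margarine"]
def pvBGluten : List String := ["yeast", "flour", "wheat", "bread", "bread crumbs", "beer", "rye", "barley", "pasta", "dough", "macaroni", "cake"]

-- WORD_MASK: word -> bitmask (bit0 non-vegan, bit1 non-vegetarian, bit2 lactose, bit3 gluten)
def pvBWordMask : PySem.Dict String Nat :=
  [(pvBVegan, 1), (pvBVegetarian, 3), (pvBLactose, 5), (pvBGluten, 8)].foldl
    (fun d p => p.1.foldl (fun d w => d.insert w ((d.getD w 0) ||| p.2)) d) PySem.Dict.empty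

def classify_recipe_alt (ingredients : List String) : List String :=
  let mask : Nat :=
    ingredients.foldl
      (fun m ing =>
        pvBWordMask.items.foldl
          (fun m p => if PySem.Str.isIn ing p.1 then m ||| p.2 else m) m) 0
  let diet : PySem.Set String :=
    [((3 : Nat), "Gluten-Free"), (1, "Vegetarian"), (2, "Lactose-Free"), (0, "Vegan")].foldl
      (fun d p => if (mask >>> p.1) &&& 1 == 0 then PySem.Set.add d p.2 else d) []
  if diet.isEmpty then PySem.Set.add diet "No Restrictions" else diet

-- ===== PRECONDITION & SPEC =====
def Spec_classify_recipe (ingredients : List String) (out : List String) : Prop := out = classify_recipe_alt ingredients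
instance (ingredients : List String) (out : List String) : Decidable (Spec_classify_recipe ingredients out) := by unfold Spec_classify_recipe; infer_instance

-- ===== CLAIM (what is proved, stated in full; the proofs are below) =====
def Claim_equal_classify_recipe : Prop := ∀ (ingredients : List String), Dom_classify_recipe ingredients → Spec_classify_recipe ingredients (classify_recipe ingredients)

-- ===== LEMMAS AND PROOFS =====

-- bit i of the inner word-table fold = old bit ∨ some matching word carries bit i
theorem pvInnerBit (ing : String) (i : Nat) :
    ∀ (T : List (String × Nat)) (m : Nat),
      (T.foldl (fun m p => if PySem.Str.isIn ing p.1 then m ||| p.2 else m) m).testBit i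
        = (m.testBit i || T.any (fun p => PySem.Str.isIn ing p.1 && p.2.testBit i)) := by
  intro T
  induction T with
  | nil => intro m; simp
  | cons p T ih =>
      intro m
      simp only [List.foldl_cons, List.any_cons, ih]
      by_cases h : PySem.Str.isIn ing p.1 = true
      · rw [if_pos h]
        simp only [h, Bool.true_and, Nat.testBit_or]
        cases m.testBit i <;> cases p.2.testBit i <;> simp
      · have h' : PySem.Str.isIn ing p.1 = false := by simpa using h
        rw [if_neg h]
        simp only [h', Bool.false_and, Bool.false_or]

-- bit i of the whole mask fold = some ingredient matches some word carrying bit i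
theorem pvMaskBit (i : Nat) :
    ∀ (ings : List String) (m : Nat),
      (ings.foldl
          (fun m ing =>
            pvBWordMask.items.foldl
              (fun m p => if PySem.Str.isIn ing p.1 then m ||| p.2 else m) m) m).testBit i
        = (m.testBit i ||
            ings.any (fun ing =>
              pvBWordMask.items.any (fun p => PySem.Str.isIn ing p.1 && p.2.testBit i))) := by
  intro ings
  induction ings with
  | nil => intro m; simp
  | cons ing ings ih =>
      intro m
      simp only [List.foldl_cons, List.any_cons, ih, pvInnerBit, Bool.or_assoc]

theorem pvAnyProj (f : String → Bool) (g : Nat → Bool) :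
    ∀ (T : List (String × Nat)),
      T.any (fun p => f p.1 && g p.2) = ((T.filter (fun p => g p.2)).map Prod.fst).any f := by
  intro T
  induction T with
  | nil => rfl
  | cons p T ih =>
      simp only [List.any_cons, List.filter_cons]
      by_cases h : g p.2 <;> simp [h, ih]

-- the words carrying each bit are exactly A's corresponding word set (as a multiset)
set_option maxRecDepth 8192 in
theorem pvBit0 (ing : String) :
    pvBWordMask.items.any (fun p => PySem.Str.isIn ing p.1 && p.2.testBit 0)
      = (PySem.Set.ofList (pvVegan ++ (pvVegetarian ++ pvLactoseFree))).any (fun w => PySem.Str.isIn ing w) := by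
  rw [pvAnyProj (fun w => PySem.Str.isIn ing w) (fun m => m.testBit 0)]
  exact List.Perm.any_eq (by decide)

set_option maxRecDepth 8192 in
theorem pvBit1 (ing : String) :
    pvBWordMask.items.any (fun p => PySem.Str.isIn ing p.1 && p.2.testBit 1)
      = pvVegetarian.any (fun w => PySem.Str.isIn ing w) := by
  rw [pvAnyProj (fun w => PySem.Str.isIn ing w) (fun m => m.testBit 1)]
  exact List.Perm.any_eq (by decide)

set_option maxRecDepth 8192 in
theorem pvBit2 (ing : String) :
    pvBWordMask.items.any (fun p => PySem.Str.isIn ing p.1 && p.2.testBit 2)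
      = pvLactoseFree.any (fun w => PySem.Str.isIn ing w) := by
  rw [pvAnyProj (fun w => PySem.Str.isIn ing w) (fun m => m.testBit 2)]
  exact List.Perm.any_eq (by decide)

set_option maxRecDepth 8192 in
theorem pvBit3 (ing : String) :
    pvBWordMask.items.any (fun p => PySem.Str.isIn ing p.1 && p.2.testBit 3)
      = pvGlutenFree.any (fun w => PySem.Str.isIn ing w) := by
  rw [pvAnyProj (fun w => PySem.Str.isIn ing w) (fun m => m.testBit 3)]
  exact List.Perm.any_eq (by decide)

theorem pvBitZero (m b : Nat) : ((m >>> b) &&& 1 == 0) = !(m.testBit b) := by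
  simp [Nat.testBit, Nat.and_comm, bne]

theorem classify_recipe_eq (ingredients : List String) :
    classify_recipe ingredients = classify_recipe_alt ingredients := by
  simp only [classify_recipe, classify_recipe_alt, List.foldl_cons, List.foldl_nil,
    pvBitZero, pvMaskBit, Nat.zero_testBit, Bool.false_or, pvBit0, pvBit1, pvBit2, pvBit3]
  generalize (ingredients.any (fun ing => (PySem.Set.ofList (pvVegan ++ (pvVegetarian ++ pvLactoseFree))).any (fun w => PySem.Str.isIn ing w))) = c0
  generalize (ingredients.any (fun ing => pvVegetarian.any (fun w => PySem.Str.isIn ing w))) = c1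
  generalize (ingredients.any (fun ing => pvLactoseFree.any (fun w => PySem.Str.isIn ing w))) = c2
  generalize (ingredients.any (fun ing => pvGlutenFree.any (fun w => PySem.Str.isIn ing w))) = c3
  cases c0 <;> cases c1 <;> cases c2 <;> cases c3 <;> rfl

-- ===== VERDICT (by name: the statement is the Claim_ definition above) =====
theorem classify_recipe_spec : Claim_equal_classify_recipe := by
  intro ingredients _
  unfold Spec_classify_recipe
  exact classify_recipe_eq ingredients
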